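-- pv_equiv track=rewrite | github.com/utiasSTARS/GraphIK | graphik/utils/robot_visualization.py | get_tree_paths
-- ===== SOURCE A (Python) =====
-- def get_tree_paths(parent_nodes):
--     n_nodes = len(parent_nodes) + 1
--     heads = [[0]]
--     for idx, parent_node in enumerate(parent_nodes):
--         for head in heads:
--             if head[-1] == parent_node:
--                 head.append(idx + 1)
--                 break
--         else:
--             heads.append([parent_node, idx + 1])
--     return heads
-- ===== SOURCE B (Python) =====
-- def get_tree_paths(parent_nodes):
--     # One-pass continuation table + chain following instead of repeated scans over heads.
--     cont = {}
--     for i, p in enumerate(parent_nodes):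
--         c = i + 1
--         if 0 <= p < c and p not in cont:
--             cont[p] = c
--
--     def chain(v):
--         out = []
--         while v in cont:
--             v = cont[v]
--             out.append(v)
--         return out
--
--     paths = [[0] + chain(0)]
--     for i, p in enumerate(parent_nodes):
--         c = i + 1
--         if cont.get(p) != c:
--             paths.append([p, c] + chain(c))
--     return paths
-- ===== Notes on version B (the rewrite author's own statement) =====
-- stated objective: faster
-- what changed: Replaces A's per-node linear scan over the growing list of heads by a single-pass continuation table (dict mapping each node to its smallest strictly-larger child) followed by chain-following to emit the root path and one new path per non-continuation child.
import Mathlib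
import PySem

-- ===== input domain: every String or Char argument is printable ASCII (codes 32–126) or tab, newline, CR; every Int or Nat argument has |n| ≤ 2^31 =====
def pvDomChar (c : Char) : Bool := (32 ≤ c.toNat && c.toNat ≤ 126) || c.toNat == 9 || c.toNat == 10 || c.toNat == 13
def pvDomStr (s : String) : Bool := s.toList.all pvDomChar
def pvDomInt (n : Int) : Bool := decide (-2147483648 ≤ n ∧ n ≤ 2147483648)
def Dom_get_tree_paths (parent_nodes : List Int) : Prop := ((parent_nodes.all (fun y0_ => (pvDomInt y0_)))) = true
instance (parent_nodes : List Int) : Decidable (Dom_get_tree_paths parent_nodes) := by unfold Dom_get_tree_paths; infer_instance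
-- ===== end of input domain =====

-- B replaces A's repeated linear scans over the list of heads by a one-pass continuation
-- table (a dict) plus chain following; objective: a different, faster algorithm.

-- ===== PORT A =====
-- A's inner 'for head in heads: … break / else:' loop: the first head whose last element
-- equals p gets c appended; 'none' = no head matched (the for-else branch).
def pvScanA (p c : Int) : List (List Int) → Option (List (List Int))
  | [] => none
  | h :: t =>
    if PySem.List.pyGet? h (-1) = some p then some ((h ++ [c]) :: t)
    else
      match pvScanA p c t with
      | some t' => some (h :: t')
      | none => none

def pvStepA (heads : List (List Int)) (p c : Int) : List (List Int) :=
  match pvScanA p c heads with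
  | some hs => hs
  | none => heads ++ [[p, c]]

def get_tree_paths (parent_nodes : List Int) : List (List Int) :=
  (PySem.List.enumerate parent_nodes).foldl (fun hs ip => pvStepA hs ip.2 (ip.1 + 1)) [[0]]

-- ===== PORT B =====
-- the first loop of Source B: cont[p] = smallest child index c with 0 <= p < c
def pvCont (parent_nodes : List Int) : PySem.Dict Int Int :=
  (PySem.List.enumerate parent_nodes).foldl
    (fun d ip =>
      if 0 ≤ ip.2 ∧ ip.2 < ip.1 + 1 ∧ d.contains ip.2 = false then d.insert ip.2 (ip.1 + 1) else d)
    PySem.Dict.empty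

-- Source B's 'chain' while-loop; fuel = len(parent_nodes)+1 never runs out because every
-- cont step strictly increases v ≥ 0 and all stored values are ≤ len(parent_nodes)
def pvChain (d : PySem.Dict Int Int) : Nat → Int → List Int
  | 0, _ => []
  | fuel + 1, v =>
    match d.get? v with
    | none => []
    | some u => u :: pvChain d fuel u

def get_tree_paths_alt (parent_nodes : List Int) : List (List Int) :=
  (PySem.List.enumerate parent_nodes).foldl
    (fun acc ip =>
      if (pvCont parent_nodes).get? ip.2 = some (ip.1 + 1) then acc
      else acc ++ [ip.2 :: (ip.1 + 1) :: pvChain (pvCont parent_nodes) (parent_nodes.length + 1) (ip.1 + 1)])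
    [0 :: pvChain (pvCont parent_nodes) (parent_nodes.length + 1) 0]

-- ===== PRECONDITION & SPEC =====
def Spec_get_tree_paths (parent_nodes : List Int) (out : List (List Int)) : Prop := out = get_tree_paths_alt parent_nodes
instance (parent_nodes : List Int) (out : List (List Int)) : Decidable (Spec_get_tree_paths parent_nodes out) := by unfold Spec_get_tree_paths; infer_instance

-- ===== CLAIM (what is proved, stated in full; the proofs are below) =====
def Claim_equal_get_tree_paths : Prop := ∀ (parent_nodes : List Int), Dom_get_tree_paths parent_nodes → Spec_get_tree_paths parent_nodes (get_tree_paths parent_nodes)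

-- ===== LEMMAS AND PROOFS =====

-- last elements of the heads
def pvLasts (hs : List (List Int)) : List (Option Int) := hs.map (fun h => h.getLast?)

-- bound property of a continuation dict
def pvBd (d : PySem.Dict Int Int) (B : Int) : Prop := ∀ w u, d.get? w = some u → w < u ∧ u ≤ B

theorem pv_enumerate_snoc (P : List Int) (p : Int) :
    PySem.List.enumerate (P ++ [p]) = PySem.List.enumerate P ++ [((P.length : Int), p)] := by
  rw [PySem.List.enumerate_append]
  simp [PySem.List.enumerate_cons, PySem.List.enumerate_nil]

theorem pvCont_snoc (P : List Int) (p : Int) :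
    pvCont (P ++ [p]) =
      if 0 ≤ p ∧ p < (P.length : Int) + 1 ∧ (pvCont P).contains p = false
      then (pvCont P).insert p ((P.length : Int) + 1) else pvCont P := by
  unfold pvCont
  rw [pv_enumerate_snoc, List.foldl_append]
  simp only [List.foldl_cons, List.foldl_nil]

theorem pvCont_bound (P : List Int) :
    ∀ w u, (pvCont P).get? w = some u → 0 ≤ w ∧ w < u ∧ u ≤ (P.length : Int) := by
  induction P using List.reverseRecOn with
  | nil =>
    intro w u h
    simp [pvCont, PySem.List.enumerate_nil, PySem.Dict.get?_empty] at h
  | append_singleton P p ih =>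
    intro w u h
    rw [pvCont_snoc] at h
    have hlen : (((P ++ [p]).length : Int)) = (P.length : Int) + 1 := by simp
    rw [hlen]
    split_ifs at h with hk
    · rw [PySem.Dict.get?_insert] at h
      split_ifs at h with hw
      · obtain ⟨h0, h1, _⟩ := hk
        cases h
        omega
      · have := ih w u h
        omega
    · have := ih w u h
      omega

theorem pvCont_get?_none_of_gt (P : List Int) (v : Int) (h : (P.length : Int) < v) :
    (pvCont P).get? v = none := by
  cases hg : (pvCont P).get? v with
  | none => rfl
  | some u => have := pvCont_bound P v u hg; omega

theorem pvChain_fuel (d : PySem.Dict Int Int) (B : Int) (hd : pvBd d B) :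
    ∀ f₁ f₂ (v : Int), (B - v).toNat < f₁ → (B - v).toNat < f₂ → pvChain d f₁ v = pvChain d f₂ v := by
  intro f₁
  induction f₁ with
  | zero => intro f₂ v h₁ _; omega
  | succ g ih =>
    intro f₂ v h₁ h₂
    cases f₂ with
    | zero => omega
    | succ g₂ =>
      cases hg : d.get? v with
      | none => simp only [pvChain, hg]
      | some u =>
        obtain ⟨hvu, huB⟩ := hd v u hg
        simp only [pvChain, hg]
        rw [ih g₂ u (by omega) (by omega)]

theorem pvChain_insert (d : PySem.Dict Int Int) (B p c : Int) (hd : pvBd d B)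
    (hp : d.get? p = none) (hpc : p ≠ c) (hcB : B < c) :
    ∀ f (v : Int), (B - v).toNat < f →
      pvChain (d.insert p c) (f + 1) v =
        pvChain d f v ++ (if (pvChain d f v).getLast?.getD v = p then [c] else []) := by
  intro f
  induction f with
  | zero => intro v h; omega
  | succ g ih =>
    intro v hv
    by_cases hvp : v = p
    · subst hvp
      have h1 : pvChain d (g + 1) v = [] := by simp only [pvChain, hp]
      have hc : d.get? c = none := by
        cases hg : d.get? c with
        | none => rfl
        | some u => have := hd c u hg; omega
      have hgv : (d.insert v c).get? v = some c := by
        rw [PySem.Dict.get?_insert, if_pos rfl]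
      have hgc : (d.insert v c).get? c = none := by
        rw [PySem.Dict.get?_insert, if_neg (fun h => hpc h.symm)]
        exact hc
      have h2 : pvChain (d.insert v c) (g + 1 + 1) v = [c] := by
        simp only [pvChain, hgv, hgc]
      rw [h1, h2]
      simp
    · have hget : (d.insert p c).get? v = d.get? v := by
        rw [PySem.Dict.get?_insert, if_neg hvp]
      cases hg : d.get? v with
      | none =>
        have h1 : pvChain d (g + 1) v = [] := by simp only [pvChain, hg]
        have h2 : pvChain (d.insert p c) (g + 1 + 1) v = [] := by
          simp only [pvChain, hget, hg]
        rw [h1, h2]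
        simp [hvp]
      | some u =>
        obtain ⟨hvu, huB⟩ := hd v u hg
        have h1 : pvChain d (g + 1) v = u :: pvChain d g u := by simp only [pvChain, hg]
        have h2 : pvChain (d.insert p c) (g + 1 + 1) v = u :: pvChain (d.insert p c) (g + 1) u := by
          rw [show g + 1 + 1 = (g + 1) + 1 from rfl]
          simp only [pvChain, hget, hg]
        rw [h1, h2, ih u (by omega)]
        simp [List.getLast?_cons]

theorem pvScanA_none (p c : Int) (hs : List (List Int)) (h : ∀ x ∈ hs, x.getLast? ≠ some p) :
    pvScanA p c hs = none := by
  induction hs with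
  | nil => rfl
  | cons x t ih =>
    simp only [pvScanA, PySem.List.pyGet?_neg_one]
    rw [if_neg (h x (List.mem_cons_self))]
    rw [ih (fun y hy => h y (List.mem_cons_of_mem x hy))]

theorem pvScanA_eq_map (p c : Int) (hs : List (List Int))
    (hmem : some p ∈ pvLasts hs) (hnd : (pvLasts hs).Nodup) :
    pvScanA p c hs = some (hs.map (fun h => if h.getLast? = some p then h ++ [c] else h)) := by
  induction hs with
  | nil => simp [pvLasts] at hmem
  | cons x t ih =>
    simp only [pvLasts, List.map_cons, List.nodup_cons] at hnd
    by_cases hx : x.getLast? = some p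
    · simp only [pvScanA, PySem.List.pyGet?_neg_one]
      rw [if_pos hx]
      have ht : t.map (fun h => if h.getLast? = some p then h ++ [c] else h) = t := by
        have : ∀ y ∈ t, (if y.getLast? = some p then y ++ [c] else y) = y := by
          intro y hy
          rw [if_neg]
          intro hyp
          exact hnd.1 (hx ▸ hyp ▸ List.mem_map_of_mem hy)
        calc t.map _ = t.map id := List.map_congr_left this
        _ = t := List.map_id t
      rw [List.map_cons, if_pos hx, ht]
    · have hmt : some p ∈ pvLasts t := by
        simp only [pvLasts, List.map_cons, List.mem_cons] at hmem
        cases hmem with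
        | inl h => exact absurd h.symm hx
        | inr h => exact h
      simp only [pvScanA, PySem.List.pyGet?_neg_one]
      rw [if_neg hx, ih hmt hnd.2, List.map_cons, if_neg hx]

theorem pvA_snoc (P : List Int) (p : Int) :
    get_tree_paths (P ++ [p]) = pvStepA (get_tree_paths P) p ((P.length : Int) + 1) := by
  unfold get_tree_paths
  rw [pv_enumerate_snoc, List.foldl_append]
  simp only [List.foldl_cons, List.foldl_nil]

theorem pv_foldl_map_ext (cond cond' : Int × Int → Prop) [DecidablePred cond] [DecidablePred cond']
    (g g' : Int × Int → List Int) (ext : List Int → List Int) (E : List (Int × Int))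
    (h : ∀ x ∈ E, (cond' x ↔ cond x) ∧ g' x = ext (g x)) :
    ∀ acc : List (List Int),
      E.foldl (fun a x => if cond' x then a else a ++ [g' x]) (acc.map ext)
        = (E.foldl (fun a x => if cond x then a else a ++ [g x]) acc).map ext := by
  induction E with
  | nil => intro acc; rfl
  | cons x t ih =>
    intro acc
    have hx := h x (List.mem_cons_self)
    have ht := fun y hy => h y (List.mem_cons_of_mem x hy)
    simp only [List.foldl_cons]
    by_cases hc : cond x
    · rw [if_pos hc, if_pos (hx.1.2 hc)]
      exact ih ht acc
    · rw [if_neg hc, if_neg (fun hc' => hc (hx.1.1 hc'))]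
      have : acc.map ext ++ [g' x] = (acc ++ [g x]).map ext := by
        rw [List.map_append, hx.2]; rfl
      rw [this]
      exact ih ht (acc ++ [g x])

theorem pv_foldl_congr (cond cond' : Int × Int → Prop) [DecidablePred cond] [DecidablePred cond']
    (g g' : Int × Int → List Int) (E : List (Int × Int))
    (h : ∀ x ∈ E, (cond' x ↔ cond x) ∧ g' x = g x) :
    ∀ acc : List (List Int),
      E.foldl (fun a x => if cond' x then a else a ++ [g' x]) acc
        = E.foldl (fun a x => if cond x then a else a ++ [g x]) acc := by
  induction E with
  | nil => intro acc; rfl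
  | cons x t ih =>
    intro acc
    have hx := h x (List.mem_cons_self)
    have ht := fun y hy => h y (List.mem_cons_of_mem x hy)
    simp only [List.foldl_cons]
    by_cases hc : cond x
    · rw [if_pos hc, if_pos (hx.1.2 hc)]
      exact ih ht acc
    · rw [if_neg hc, if_neg (fun hc' => hc (hx.1.1 hc')), hx.2]
      exact ih ht (acc ++ [g x])

theorem pvAlt_snoc_new (P : List Int) (p : Int)
    (h0 : 0 ≤ p) (h1 : p < (P.length : Int) + 1) (h2 : (pvCont P).contains p = false) :
    get_tree_paths_alt (P ++ [p]) =
      (get_tree_paths_alt P).map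
        (fun h => if h.getLast? = some p then h ++ [(P.length : Int) + 1] else h) := by
  have hBd : pvBd (pvCont P) (P.length : Int) :=
    fun w u h => ⟨(pvCont_bound P w u h).2.1, (pvCont_bound P w u h).2.2⟩
  have hget : (pvCont P).get? p = none := (PySem.Dict.get?_eq_none_iff_contains _ _).2 h2
  have hcont' : pvCont (P ++ [p]) = (pvCont P).insert p ((P.length : Int) + 1) := by
    rw [pvCont_snoc, if_pos ⟨h0, h1, h2⟩]
  have hlen : (P ++ [p]).length + 1 = (P.length + 1) + 1 := by simp
  have hchain : ∀ v : Int, 0 ≤ v →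
      pvChain (pvCont (P ++ [p])) ((P ++ [p]).length + 1) v
        = pvChain (pvCont P) (P.length + 1) v
          ++ (if (pvChain (pvCont P) (P.length + 1) v).getLast?.getD v = p
              then [(P.length : Int) + 1] else []) := by
    intro v hv
    rw [hcont', hlen]
    exact pvChain_insert (pvCont P) (P.length : Int) p ((P.length : Int) + 1) hBd hget
      (by omega) (by omega) (P.length + 1) v (by omega)
  unfold get_tree_paths_alt
  rw [pv_enumerate_snoc, List.foldl_append]
  simp only [List.foldl_cons, List.foldl_nil]
  rw [if_pos (by rw [hcont', PySem.Dict.get?_insert, if_pos rfl])]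
  have hroot : (0 : Int) :: pvChain (pvCont (P ++ [p])) ((P ++ [p]).length + 1) 0
      = (fun h => if h.getLast? = some p then h ++ [(P.length : Int) + 1] else h)
          ((0 : Int) :: pvChain (pvCont P) (P.length + 1) 0) := by
    rw [hchain 0 le_rfl]
    simp only [List.getLast?_cons]
    by_cases he : (pvChain (pvCont P) (P.length + 1) 0).getLast?.getD 0 = p
    · rw [if_pos he, if_pos (by rw [he]), List.cons_append]
    · rw [if_neg he, if_neg (by simp [he]), List.append_nil]
  rw [hroot]
  have := pv_foldl_map_ext
    (fun ip => (pvCont P).get? ip.2 = some (ip.1 + 1))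
    (fun ip => (pvCont (P ++ [p])).get? ip.2 = some (ip.1 + 1))
    (fun ip => ip.2 :: (ip.1 + 1) :: pvChain (pvCont P) (P.length + 1) (ip.1 + 1))
    (fun ip => ip.2 :: (ip.1 + 1) :: pvChain (pvCont (P ++ [p])) ((P ++ [p]).length + 1) (ip.1 + 1))
    (fun h => if h.getLast? = some p then h ++ [(P.length : Int) + 1] else h)
    (PySem.List.enumerate P)
    (by
      intro ip hip
      obtain ⟨k, hk, hipeq⟩ := (PySem.List.mem_enumerate_iff P 0 ip).1 hip
      have hip1 : ip.1 = (k : Int) := by rw [hipeq]; simp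
      have hk1 : 0 ≤ ip.1 ∧ ip.1 < (P.length : Int) := by rw [hip1]; constructor <;> omega
      constructor
      · beta_reduce
        rw [hcont', PySem.Dict.get?_insert]
        by_cases hqp : ip.2 = p
        · rw [if_pos hqp]
          constructor
          · intro hcc
            injection hcc with hcc'
            exact absurd hcc' (by omega)
          · intro hcc
            rw [hqp, hget] at hcc
            cases hcc
        · rw [if_neg hqp]
      · beta_reduce
        rw [hchain (ip.1 + 1) (by omega)]
        simp only [List.getLast?_cons]
        by_cases he : (pvChain (pvCont P) (P.length + 1) (ip.1 + 1)).getLast?.getD (ip.1 + 1) = p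
        · rw [if_pos he, if_pos (by simp [he]), List.cons_append, List.cons_append]
        · rw [if_neg he, if_neg (by simp [he]), List.append_nil])
    [(0 : Int) :: pvChain (pvCont P) (P.length + 1) 0]
  simpa using this

theorem pvAlt_snoc_old (P : List Int) (p : Int)
    (h : ¬ (0 ≤ p ∧ p < (P.length : Int) + 1 ∧ (pvCont P).contains p = false)) :
    get_tree_paths_alt (P ++ [p]) = get_tree_paths_alt P ++ [[p, (P.length : Int) + 1]] := by
  have hBd : pvBd (pvCont P) (P.length : Int) :=
    fun w u hh => ⟨(pvCont_bound P w u hh).2.1, (pvCont_bound P w u hh).2.2⟩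
  have hcont' : pvCont (P ++ [p]) = pvCont P := by rw [pvCont_snoc, if_neg h]
  have hlen : (P ++ [p]).length + 1 = (P.length + 1) + 1 := by simp
  have hchain : ∀ v : Int, 0 ≤ v →
      pvChain (pvCont (P ++ [p])) ((P ++ [p]).length + 1) v
        = pvChain (pvCont P) (P.length + 1) v := by
    intro v hv
    rw [hcont', hlen]
    exact pvChain_fuel (pvCont P) (P.length : Int) hBd (P.length + 1 + 1) (P.length + 1) v
      (by omega) (by omega)
  have hcondp : ¬ ((pvCont P).get? p = some ((P.length : Int) + 1)) := by
    intro hc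
    have := pvCont_bound P p ((P.length : Int) + 1) hc
    omega
  have hchainc : pvChain (pvCont (P ++ [p])) ((P ++ [p]).length + 1) ((P.length : Int) + 1) = [] := by
    rw [hcont', hlen]
    simp only [pvChain]
    rw [pvCont_get?_none_of_gt P ((P.length : Int) + 1) (by omega)]
  unfold get_tree_paths_alt
  rw [pv_enumerate_snoc, List.foldl_append]
  simp only [List.foldl_cons, List.foldl_nil]
  rw [if_neg (by rw [hcont']; exact hcondp), hchainc]
  rw [hchain 0 le_rfl]
  congr 1
  exact pv_foldl_congr
    (fun ip => (pvCont P).get? ip.2 = some (ip.1 + 1))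
    (fun ip => (pvCont (P ++ [p])).get? ip.2 = some (ip.1 + 1))
    (fun ip => ip.2 :: (ip.1 + 1) :: pvChain (pvCont P) (P.length + 1) (ip.1 + 1))
    (fun ip => ip.2 :: (ip.1 + 1) :: pvChain (pvCont (P ++ [p])) ((P ++ [p]).length + 1) (ip.1 + 1))
    (PySem.List.enumerate P)
    (by
      intro ip hip
      obtain ⟨k, hk, hipeq⟩ := (PySem.List.mem_enumerate_iff P 0 ip).1 hip
      have hip1 : ip.1 = (k : Int) := by rw [hipeq]; simp
      refine ⟨by beta_reduce; rw [hcont'], ?_⟩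
      beta_reduce
      rw [hchain (ip.1 + 1) (by omega)])
    [(0 : Int) :: pvChain (pvCont P) (P.length + 1) 0]

theorem pvLasts_map_ext (p c : Int) (hs : List (List Int)) :
    pvLasts (hs.map (fun h => if h.getLast? = some p then h ++ [c] else h))
      = (pvLasts hs).map (fun o => if o = some p then some c else o) := by
  unfold pvLasts
  rw [List.map_map, List.map_map]
  apply List.map_congr_left
  intro h _
  simp only [Function.comp]
  by_cases hh : h.getLast? = some p
  · rw [if_pos hh, if_pos hh, List.getLast?_concat]
  · rw [if_neg hh, if_neg hh]

-- the main invariant, proved by induction on P from the right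
theorem pvMain (P : List Int) :
    get_tree_paths P = get_tree_paths_alt P
    ∧ (∀ w : Int, (0 ≤ w ∧ w ≤ (P.length : Int) ∧ (pvCont P).get? w = none)
        ↔ some w ∈ pvLasts (get_tree_paths_alt P))
    ∧ (pvLasts (get_tree_paths_alt P)).Nodup := by
  induction P using List.reverseRecOn with
  | nil =>
    refine ⟨rfl, ?_, ?_⟩
    · intro w
      have : pvLasts (get_tree_paths_alt []) = [some 0] := rfl
      rw [this]
      constructor
      · rintro ⟨hw0, hwle, _⟩
        simp only [List.length_nil, Nat.cast_zero] at hwle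
        have : w = 0 := by omega
        simp [this]
      · intro hm
        simp only [List.mem_singleton, Option.some.injEq] at hm
        subst hm
        refine ⟨le_rfl, by simp, ?_⟩
        simp [pvCont, PySem.List.enumerate_nil, PySem.Dict.get?_empty]
    · exact List.nodup_singleton _
  | append_singleton P p ih =>
    obtain ⟨ih1, ih2, ih3⟩ := ih
    have hlen : (((P ++ [p]).length : Int)) = (P.length : Int) + 1 := by simp
    by_cases hk : 0 ≤ p ∧ p < (P.length : Int) + 1 ∧ (pvCont P).contains p = false
    · obtain ⟨h0, h1, h2⟩ := hk
      have hget : (pvCont P).get? p = none := (PySem.Dict.get?_eq_none_iff_contains _ _).2 h2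
      have hcont' : pvCont (P ++ [p]) = (pvCont P).insert p ((P.length : Int) + 1) := by
        rw [pvCont_snoc, if_pos ⟨h0, h1, h2⟩]
      have halt := pvAlt_snoc_new P p h0 h1 h2
      have hmemp : some p ∈ pvLasts (get_tree_paths_alt P) :=
        (ih2 p).1 ⟨h0, by omega, hget⟩
      have hlasts : pvLasts (get_tree_paths_alt (P ++ [p]))
          = (pvLasts (get_tree_paths_alt P)).map
              (fun o => if o = some p then some ((P.length : Int) + 1) else o) := by
        rw [halt, pvLasts_map_ext]
      refine ⟨?_, ?_, ?_⟩
      · rw [pvA_snoc, ih1, pvStepA,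
          pvScanA_eq_map p ((P.length : Int) + 1) _ hmemp ih3, halt]
      · intro w
        rw [hlasts, hlen, hcont']
        constructor
        · rintro ⟨hw0, hwle, hwnone⟩
          rw [PySem.Dict.get?_insert] at hwnone
          split_ifs at hwnone with hwp
          by_cases hw : w = (P.length : Int) + 1
          · subst hw
            exact List.mem_map.2 ⟨some p, hmemp, by rw [if_pos rfl]⟩
          · have hmem : some w ∈ pvLasts (get_tree_paths_alt P) :=
              (ih2 w).1 ⟨hw0, by omega, hwnone⟩
            exact List.mem_map.2 ⟨some w, hmem, by
              rw [if_neg (fun hh => hwp (Option.some.inj hh))]⟩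
        · intro hmem
          obtain ⟨o, ho, hrel⟩ := List.mem_map.1 hmem
          by_cases hop : o = some p
          · rw [if_pos hop] at hrel
            have hw : w = (P.length : Int) + 1 := by injection hrel.symm
            subst hw
            refine ⟨by omega, le_rfl, ?_⟩
            rw [PySem.Dict.get?_insert, if_neg (by omega)]
            exact pvCont_get?_none_of_gt P _ (by omega)
          · rw [if_neg hop] at hrel
            subst hrel
            obtain ⟨hw0, hwle, hwnone⟩ := (ih2 w).2 ho
            refine ⟨hw0, by omega, ?_⟩
            rw [PySem.Dict.get?_insert, if_neg (fun hwp => hop (by rw [hwp]))]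
            exact hwnone
      · rw [hlasts]
        refine List.Nodup.map_on ?_ ih3
        intro o1 h1' o2 h2' heq
        by_cases ha : o1 = some p <;> by_cases hb : o2 = some p
        · rw [ha, hb]
        · exfalso
          rw [if_pos ha, if_neg hb] at heq
          have : some ((P.length : Int) + 1) ∈ pvLasts (get_tree_paths_alt P) := heq ▸ h2'
          have := (ih2 _).2 this
          omega
        · exfalso
          rw [if_neg ha, if_pos hb] at heq
          have : some ((P.length : Int) + 1) ∈ pvLasts (get_tree_paths_alt P) := heq.symm ▸ h1'
          have := (ih2 _).2 this
          omega
        · rw [if_neg ha, if_neg hb] at heq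
          exact heq
    · have hcont' : pvCont (P ++ [p]) = pvCont P := by rw [pvCont_snoc, if_neg hk]
      have halt := pvAlt_snoc_old P p hk
      have hnolast : ∀ x ∈ get_tree_paths_alt P, x.getLast? ≠ some p := by
        intro x hx he
        have hmem : some p ∈ pvLasts (get_tree_paths_alt P) :=
          List.mem_map.2 ⟨x, hx, he⟩
        obtain ⟨hp0, hple, hpnone⟩ := (ih2 p).2 hmem
        exact hk ⟨hp0, by omega, (PySem.Dict.get?_eq_none_iff_contains _ _).1 hpnone⟩
      have hlasts : pvLasts (get_tree_paths_alt (P ++ [p]))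
          = pvLasts (get_tree_paths_alt P) ++ [some ((P.length : Int) + 1)] := by
        have hone : ([p, (P.length : Int) + 1] : List Int).getLast? = some ((P.length : Int) + 1) := rfl
        rw [halt]
        unfold pvLasts
        rw [List.map_append]
        simp [hone]
      refine ⟨?_, ?_, ?_⟩
      · rw [pvA_snoc, ih1, pvStepA, pvScanA_none p ((P.length : Int) + 1) _ hnolast, halt]
      · intro w
        rw [hlasts, hlen, hcont', List.mem_append]
        constructor
        · rintro ⟨hw0, hwle, hwnone⟩
          by_cases hw : w = (P.length : Int) + 1
          · subst hw; right; simp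
          · left; exact (ih2 w).1 ⟨hw0, by omega, hwnone⟩
        · intro hmem
          cases hmem with
          | inl hm =>
            obtain ⟨hw0, hwle, hwnone⟩ := (ih2 w).2 hm
            exact ⟨hw0, by omega, hwnone⟩
          | inr hm =>
            simp only [List.mem_singleton, Option.some.injEq] at hm
            subst hm
            exact ⟨by omega, le_rfl, pvCont_get?_none_of_gt P _ (by omega)⟩
      · rw [hlasts]
        refine List.Nodup.append ih3 (List.nodup_singleton _) ?_
        intro o ho1 ho2
        simp only [List.mem_singleton] at ho2
        subst ho2
        have := (ih2 _).2 ho1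
        omega

-- ===== VERDICT (by name: the statement is the Claim_ definition above) =====
theorem get_tree_paths_spec : Claim_equal_get_tree_paths := by
  intro P _
  unfold Spec_get_tree_paths
  exact (pvMain P).1
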